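-- pv_equiv track=rewrite | github.com/privateice/AdventOfCode | 2023/05/test.py | find_overlapping_ranges
-- ===== SOURCE A (Python) =====
-- def find_overlapping_ranges(start, end, ranges):
--     overlaps = []
--     non_overlapping_parts = []
--
--     for s, e in ranges:
--         # Check for complete overlap
--         if s <= start and e >= end:
--             overlaps.append((s, e))
--         # Check for partial overlap
--         elif e >= start and s <= end:
--             overlaps.append((max(s, start), min(e, end)))
--
--     # Identify non-overlapping parts
--     if overlaps:
--         non_overlapping_parts.append((start, overlaps[0][0]))
--         for i in range(1, len(overlaps)):
--             non_overlapping_parts.append((overlaps[i-1][1], overlaps[i][0]))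
--         non_overlapping_parts.append((overlaps[-1][1], end))
--     else:
--         non_overlapping_parts.append((start, end))
--
--     return overlaps, non_overlapping_parts
-- ===== SOURCE B (Python) =====
-- def find_overlapping_ranges(start, end, ranges):
--     # Single recursive pass: builds overlaps and the gap chain simultaneously,
--     # threading the previous boundary; no second staged loop, no empty guard.
--     def go(prev, rs):
--         if not rs:
--             return [], [(prev, end)]
--         s, e = rs[0]
--         if s <= start and e >= end:
--             ov = (s, e)
--         elif e >= start and s <= end:
--             ov = (max(s, start), min(e, end))
--         else:
--             return go(prev, rs[1:])
--         rest_overlaps, rest_gaps = go(ov[1], rs[1:])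
--         return [ov] + rest_overlaps, [(prev, ov[0])] + rest_gaps
--     return go(start, ranges)
-- ===== Notes on version B (the rewrite author's own statement) =====
-- stated objective: alternative
-- what changed: replaces A's two staged loops (build overlaps, then an index-based gap loop guarded by an emptiness check) with one recursive pass over ranges that constructs the overlap list and the gap chain simultaneously by threading the previous boundary, making the second pass and the guard disappear
import Mathlib
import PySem

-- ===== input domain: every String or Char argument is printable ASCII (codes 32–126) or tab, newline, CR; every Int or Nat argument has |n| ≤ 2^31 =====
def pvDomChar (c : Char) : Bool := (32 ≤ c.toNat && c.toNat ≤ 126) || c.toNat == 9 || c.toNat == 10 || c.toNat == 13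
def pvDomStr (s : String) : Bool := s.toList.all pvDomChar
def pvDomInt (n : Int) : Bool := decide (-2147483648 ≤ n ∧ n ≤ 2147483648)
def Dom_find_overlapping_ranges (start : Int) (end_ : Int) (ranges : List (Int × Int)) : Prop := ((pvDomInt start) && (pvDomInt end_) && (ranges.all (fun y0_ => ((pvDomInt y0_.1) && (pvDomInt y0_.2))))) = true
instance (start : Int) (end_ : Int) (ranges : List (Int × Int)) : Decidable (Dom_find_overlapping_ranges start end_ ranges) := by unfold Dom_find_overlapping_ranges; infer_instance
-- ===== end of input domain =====

-- B replaces A's two staged loops with a single recursive pass that builds the overlap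
-- list and the gap chain simultaneously by threading the previous boundary (alternative).

-- ===== PORT A =====
def find_overlapping_ranges (start : Int) (end_ : Int) (ranges : List (Int × Int)) : (List (Int × Int)) × (List (Int × Int)) :=
  let overlaps := ranges.foldl (fun acc p =>
    if p.1 ≤ start ∧ p.2 ≥ end_ then acc ++ [(p.1, p.2)]
    else if p.2 ≥ start ∧ p.1 ≤ end_ then acc ++ [(max p.1 start, min p.2 end_)]
    else acc) []
  let non_overlapping_parts : List (Int × Int) :=
    if overlaps ≠ [] then
      ([(start, (PySem.List.pyGetD overlaps 0 (0, 0)).1)]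
        ++ (PySem.List.pyRange 1 overlaps.length 1).foldl (fun acc i =>
             acc ++ [((PySem.List.pyGetD overlaps (i - 1) (0, 0)).2,
                      (PySem.List.pyGetD overlaps i (0, 0)).1)]) []
        ++ [((PySem.List.pyGetD overlaps (-1) (0, 0)).2, end_)])
    else [(start, end_)]
  (overlaps, non_overlapping_parts)

-- ===== PORT B =====
-- inner recursive helper `go` of Source B
def pvGo (start end_ : Int) : Int → List (Int × Int) → (List (Int × Int)) × (List (Int × Int))
  | prev, [] => ([], [(prev, end_)])
  | prev, p :: rest =>
    if p.1 ≤ start ∧ p.2 ≥ end_ then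
      let ov := (p.1, p.2)
      let r := pvGo start end_ ov.2 rest
      (ov :: r.1, (prev, ov.1) :: r.2)
    else if p.2 ≥ start ∧ p.1 ≤ end_ then
      let ov := (max p.1 start, min p.2 end_)
      let r := pvGo start end_ ov.2 rest
      (ov :: r.1, (prev, ov.1) :: r.2)
    else pvGo start end_ prev rest

def find_overlapping_ranges_alt (start : Int) (end_ : Int) (ranges : List (Int × Int)) : (List (Int × Int)) × (List (Int × Int)) :=
  pvGo start end_ start ranges

-- ===== PRECONDITION & SPEC =====
def Spec_find_overlapping_ranges (start : Int) (end_ : Int) (ranges : List (Int × Int)) (out : (List (Int × Int)) × (List (Int × Int))) : Prop := out = find_overlapping_ranges_alt start end_ ranges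
instance (start : Int) (end_ : Int) (ranges : List (Int × Int)) (out : (List (Int × Int)) × (List (Int × Int))) : Decidable (Spec_find_overlapping_ranges start end_ ranges out) := by unfold Spec_find_overlapping_ranges; infer_instance

-- ===== CLAIM (what is proved, stated in full; the proofs are below) =====
def Claim_equal_find_overlapping_ranges : Prop := ∀ (start : Int) (end_ : Int) (ranges : List (Int × Int)), Dom_find_overlapping_ranges start end_ ranges → Spec_find_overlapping_ranges start end_ ranges (find_overlapping_ranges start end_ ranges)

-- ===== LEMMAS AND PROOFS =====

-- the clipped overlap of one range (characterises one loop step of A)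
def pvClip (start : Int) (end_ : Int) (p : Int × Int) : Int × Int :=
  if p.1 ≤ start ∧ p.2 ≥ end_ then (p.1, p.2) else (max p.1 start, min p.2 end_)

-- the "gap chain" both second computations produce
def pvGaps (end_ : Int) (prev : Int) : List (Int × Int) → List (Int × Int)
  | [] => [(prev, end_)]
  | p :: t => (prev, p.1) :: pvGaps end_ p.2 t

-- the overlap list as a filter+clip (proof-side characterisation)
def pvOv (start end_ : Int) (rs : List (Int × Int)) : List (Int × Int) :=
  (rs.filter (fun p =>
    decide ((p.1 ≤ start ∧ p.2 ≥ end_) ∨ (p.2 ≥ start ∧ p.1 ≤ end_)))).map (pvClip start end_)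

-- A's first loop computes pvOv
theorem pv_overlaps_eq (start end_ : Int) (ranges acc : List (Int × Int)) :
    ranges.foldl (fun acc p =>
      if p.1 ≤ start ∧ p.2 ≥ end_ then acc ++ [(p.1, p.2)]
      else if p.2 ≥ start ∧ p.1 ≤ end_ then acc ++ [(max p.1 start, min p.2 end_)]
      else acc) acc
    = acc ++ pvOv start end_ ranges := by
  induction ranges generalizing acc with
  | nil => simp [pvOv]
  | cons p t ih =>
    simp only [List.foldl_cons, pvOv, List.filter_cons]
    by_cases h1 : p.1 ≤ start ∧ p.2 ≥ end_
    · simp [h1, ih, pvOv, pvClip]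
    · by_cases h2 : p.2 ≥ start ∧ p.1 ≤ end_
      · simp [h1, h2, ih, pvOv, pvClip]
      · simp [h1, h2, ih, pvOv]

-- B's recursion computes the overlap list and its gap chain at once
theorem pv_go_eq (start end_ : Int) (rs : List (Int × Int)) (prev : Int) :
    pvGo start end_ prev rs = (pvOv start end_ rs, pvGaps end_ prev (pvOv start end_ rs)) := by
  induction rs generalizing prev with
  | nil => simp [pvGo, pvOv, pvGaps]
  | cons p t ih =>
    simp only [pvGo, pvOv, List.filter_cons]
    by_cases h1 : p.1 ≤ start ∧ p.2 ≥ end_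
    · simp [h1, ih, pvOv, pvClip, pvGaps]
    · by_cases h2 : p.2 ≥ start ∧ p.1 ≤ end_
      · simp [h1, h2, ih, pvOv, pvClip, pvGaps]
      · simp [h1, h2, ih, pvOv]

-- A's indexed second block computes pvGaps on a nonempty overlaps list
theorem pv_a_gaps (start end_ : Int) (x : Int × Int) (xs : List (Int × Int)) :
    ([(start, (PySem.List.pyGetD (x :: xs) 0 (0, 0)).1)]
      ++ (PySem.List.pyRange 1 ((x :: xs).length : Nat) 1).foldl (fun acc i =>
           acc ++ [((PySem.List.pyGetD (x :: xs) (i - 1) (0, 0)).2,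
                    (PySem.List.pyGetD (x :: xs) i (0, 0)).1)]) []
      ++ [((PySem.List.pyGetD (x :: xs) (-1) (0, 0)).2, end_)])
    = pvGaps end_ start (x :: xs) := by
  induction xs generalizing x start with
  | nil =>
    rw [PySem.List.pyGetD_neg_one _ _ (by simp)]
    simp [pvGaps, PySem.List.pyRange_one_eq_nil, PySem.List.pyGetD_zero_cons]
  | cons y ys ih =>
    have hcons : PySem.List.pyRange 1 ((x :: y :: ys).length : Int) 1
        = 1 :: PySem.List.pyRange 2 ((x :: y :: ys).length : Int) 1 := by
      rw [PySem.List.pyRange_one_cons (by push_cast [List.length_cons]; omega)]; norm_num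
    have hshift : PySem.List.pyRange 2 ((x :: y :: ys).length : Int) 1
        = (PySem.List.pyRange 1 ((y :: ys).length : Int) 1).map (fun i => i + 1) := by
      simp only [PySem.List.pyRange_one, List.map_map]
      have : ((x :: y :: ys).length : Int) - 2 = ((y :: ys).length : Int) - 1 := by simp; ring
      rw [this]
      apply List.map_congr_left; intro k _; simp; ring
    have hget : ∀ j : Int, 0 ≤ j →
        PySem.List.pyGetD (x :: y :: ys) (j + 1) ((0 : Int), (0 : Int)) = PySem.List.pyGetD (y :: ys) j (0, 0) := by
      intro j hj
      obtain ⟨m, rfl⟩ := Int.eq_ofNat_of_zero_le hj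
      have : ((m : Int) + 1) = ((m + 1 : Nat) : Int) := by push_cast; ring
      rw [this, PySem.List.pyGetD_natCast, PySem.List.pyGetD_natCast, List.getD_cons_succ]
    have hbody : ∀ (acc : List (Int × Int)),
        (PySem.List.pyRange 2 ((x :: y :: ys).length : Int) 1).foldl (fun acc i =>
          acc ++ [((PySem.List.pyGetD (x :: y :: ys) (i - 1) (0, 0)).2,
                   (PySem.List.pyGetD (x :: y :: ys) i (0, 0)).1)]) acc
        = (PySem.List.pyRange 1 ((y :: ys).length : Int) 1).foldl (fun acc i =>
          acc ++ [((PySem.List.pyGetD (y :: ys) (i - 1) (0, 0)).2,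
                   (PySem.List.pyGetD (y :: ys) i (0, 0)).1)]) acc := by
      intro acc
      rw [hshift, List.foldl_map]
      apply PySem.List.foldl_congr_mem
      intro a i hi
      have hi1 : 1 ≤ i := (PySem.List.mem_pyRange_one.mp hi).1
      have h1 : i + 1 - 1 = (i - 1) + 1 := by ring
      rw [h1, hget (i - 1) (by omega), hget i (by omega)]
    have hneg : PySem.List.pyGetD (x :: y :: ys) (-1) ((0 : Int), (0 : Int))
        = PySem.List.pyGetD (y :: ys) (-1) (0, 0) := by
      rw [PySem.List.pyGetD_neg_one _ _ (by simp), PySem.List.pyGetD_neg_one _ _ (by simp)]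
      simp [List.getLast_cons]
    show _ = (start, x.1) :: pvGaps end_ x.2 (y :: ys)
    rw [← ih x.2 y]
    simp only [hcons, List.foldl_cons, hneg]
    rw [hbody]
    have hsplit : ∀ (g : Int → Int × Int) (l : List Int) (a b : List (Int × Int)),
        l.foldl (fun acc i => acc ++ [g i]) (a ++ b) = a ++ l.foldl (fun acc i => acc ++ [g i]) b := by
      intro g l
      induction l with
      | nil => intro a b; simp
      | cons i t iht => intro a b; simp only [List.foldl_cons, List.append_assoc]; exact iht a (b ++ [g i])
    have e0 : PySem.List.pyGetD (x :: y :: ys) 0 ((0 : Int), (0 : Int)) = x := by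
      simp [PySem.List.pyGetD_zero_cons]
    have e1 : PySem.List.pyGetD (x :: y :: ys) (1 - 1) ((0 : Int), (0 : Int)) = x := by
      norm_num
    have e2 : PySem.List.pyGetD (x :: y :: ys) 1 ((0 : Int), (0 : Int)) = y := by
      have : (1 : Int) = ((1 : Nat) : Int) := rfl
      rw [this, PySem.List.pyGetD_natCast]; rfl
    have e3 : PySem.List.pyGetD (y :: ys) 0 ((0 : Int), (0 : Int)) = y := by
      simp [PySem.List.pyGetD_zero_cons]
    rw [e0, e1, e2, e3]
    have : ([] : List (Int × Int)) ++ [(x.2, y.1)] = [(x.2, y.1)] ++ [] := by simp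
    rw [this, hsplit]
    simp

-- ===== VERDICT (by name: the statement is the Claim_ definition above) =====
theorem find_overlapping_ranges_spec : Claim_equal_find_overlapping_ranges := by
  intro start end_ ranges _
  unfold Spec_find_overlapping_ranges find_overlapping_ranges find_overlapping_ranges_alt
  simp only []
  rw [pv_overlaps_eq start end_ ranges [], pv_go_eq]
  simp only [List.nil_append]
  refine Prod.ext rfl ?_
  cases hcase : pvOv start end_ ranges with
  | nil => simp [hcase, pvGaps]
  | cons x xs =>
    simp only [hcase]
    have := pv_a_gaps start end_ x xs
    simp only [List.singleton_append] at this ⊢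
    rw [if_pos (by simp), this]
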